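-- pv_equiv track=rewrite | github.com/nyankiti/algorithm_job | atCoderEnv/problems/typical90/075/075 copy.py | divied_big_two_factor
-- ===== SOURCE A (Python) =====
-- import math
--
-- def divied_big_two_factor(x):
--     factors = []
--     for i in range(2, int(math.sqrt(x))+1):
--         if x % i == 0:
--             # ニ乗の場合
--             if i == x // i:
--                 return (i, i)
--
--             factors.append(i)
--             factors.append(x // i)
--
--     if len(factors) < 2:
--         return 2, 2
--
--     return (factors[-1], factors[-2])
-- ===== SOURCE B (Python) =====
-- import math
--
-- def divied_big_two_factor(x):
--     n = int(math.sqrt(x))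
--     for i in range(n, 1, -1):
--         if x % i == 0:
--             return (x // i, i)
--     return (2, 2)
-- ===== Notes on version B (the rewrite author's own statement) =====
-- stated objective: simpler
-- what changed: B scans candidate divisors downward from int(sqrt(x)) and returns at the first hit, instead of scanning upward while accumulating a list of all factor pairs and indexing its last two; no list is maintained and the perfect-square branch disappears.
import Mathlib
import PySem

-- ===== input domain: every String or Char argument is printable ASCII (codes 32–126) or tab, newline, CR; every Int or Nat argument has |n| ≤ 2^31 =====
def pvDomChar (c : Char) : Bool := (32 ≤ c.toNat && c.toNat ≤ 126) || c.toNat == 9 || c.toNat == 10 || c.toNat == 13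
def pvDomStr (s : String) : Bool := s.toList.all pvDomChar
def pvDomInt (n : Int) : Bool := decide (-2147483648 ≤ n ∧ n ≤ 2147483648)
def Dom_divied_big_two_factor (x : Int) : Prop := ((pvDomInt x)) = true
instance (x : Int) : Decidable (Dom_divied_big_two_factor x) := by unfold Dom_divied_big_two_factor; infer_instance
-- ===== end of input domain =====

-- B replaces A's ascending scan that accumulates every factor pair in a list (and indexes its
-- last two) by a descending scan from int(sqrt(x)) with an early return and no list (objective: simpler).

-- ===== PORT A =====
-- the for-loop of A: fuel = number of remaining range elements, i = current loop variable,
-- factors = the accumulated list; after the loop, factors[-1]/factors[-2] are taken (the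
-- .getD 0 is unreachable: it is guarded by factors.length ≥ 2, exactly as in the Python).
def pvALoop (x : Int) (factors : List Int) : Nat → Int → Int × Int
  | 0, _ =>
      if factors.length < 2 then (2, 2)
      else ((PySem.List.pyGet? factors (-1)).getD 0, (PySem.List.pyGet? factors (-2)).getD 0)
  | f+1, i =>
      if PySem.Int.mod x i = 0 then
        if i = PySem.Int.floordiv x i then (i, i)
        else pvALoop x (factors ++ [i, PySem.Int.floordiv x i]) f (i + 1)
      else pvALoop x factors f (i + 1)

-- int(math.sqrt(x)) = Nat.sqrt on the domain (0 ≤ x ≤ 2^31: the double sqrt is exact enough there);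
-- math.sqrt raises ValueError for x < 0, excluded by Pre_.
def divied_big_two_factor (x : Int) : Int × Int :=
  let n : Int := Int.ofNat (Nat.sqrt x.toNat)
  pvALoop x [] (n + 1 - 2).toNat 2   -- range(2, n+1) has (n+1-2) elements

-- ===== PORT B =====
-- the for-loop of B: i descends; first divisor wins.
def pvBLoop (x : Int) : Nat → Int → Int × Int
  | 0, _ => (2, 2)
  | f+1, i =>
      if PySem.Int.mod x i = 0 then (PySem.Int.floordiv x i, i)
      else pvBLoop x f (i - 1)

def divied_big_two_factor_alt (x : Int) : Int × Int :=
  let n : Int := Int.ofNat (Nat.sqrt x.toNat)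
  pvBLoop x (n - 1).toNat n   -- range(n, 1, -1) has (n-1) elements

-- ===== PRECONDITION & SPEC =====
-- math.sqrt(x) raises ValueError for x < 0 (in A and in B alike); Pre_ excludes exactly those inputs.
def Pre_divied_big_two_factor (x : Int) : Prop := 0 ≤ x
instance (x : Int) : Decidable (Pre_divied_big_two_factor x) := by unfold Pre_divied_big_two_factor; infer_instance
def pvWitness_divied_big_two_factor : Int := 36

def Spec_divied_big_two_factor (x : Int) (out : Int × Int) : Prop := out = divied_big_two_factor_alt x
instance (x : Int) (out : Int × Int) : Decidable (Spec_divied_big_two_factor x out) := by unfold Spec_divied_big_two_factor; infer_instance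

-- ===== CLAIM (what is proved, stated in full; the proofs are below) =====
def Claim_equal_divied_big_two_factor : Prop := ∀ (x : Int), Dom_divied_big_two_factor x → Pre_divied_big_two_factor x → Spec_divied_big_two_factor x (divied_big_two_factor x)

-- ===== LEMMAS AND PROOFS =====

-- the greatest divisor of x among t, t-1, …, t-f+1 (the common spec of both loops)
def pvMaxDiv (x : Int) : Int → Nat → Option Int
  | _, 0 => none
  | t, f+1 => if PySem.Int.mod x t = 0 then some t else pvMaxDiv x (t - 1) f

theorem pvBLoop_eq_maxDiv (x : Int) (f : Nat) (i : Int) :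
    pvBLoop x f i =
      match pvMaxDiv x i f with
      | some m => (PySem.Int.floordiv x m, m)
      | none => (2, 2) := by
  induction f generalizing i with
  | zero => simp [pvBLoop, pvMaxDiv]
  | succ f ih =>
      simp only [pvBLoop, pvMaxDiv]
      split_ifs with h
      · rfl
      · exact ih (i - 1)

-- peel the BOTTOM element off a descending maxDiv scan
theorem pvMaxDiv_peel (x : Int) (f : Nat) (t : Int) :
    pvMaxDiv x t (f+1) =
      match pvMaxDiv x t f with
      | some m => some m
      | none => if PySem.Int.mod x (t - f) = 0 then some (t - f) else none := by
  induction f generalizing t with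
  | zero => by_cases h : PySem.Int.mod x t = 0 <;> simp [pvMaxDiv, h]
  | succ f ih =>
      by_cases h : PySem.Int.mod x t = 0
      · simp [pvMaxDiv, h]
      · have e1 : pvMaxDiv x t (f + 1 + 1) = pvMaxDiv x (t - 1) (f + 1) := by
          rw [pvMaxDiv, if_neg h]
        have e2 : pvMaxDiv x t (f + 1) = pvMaxDiv x (t - 1) f := by
          rw [pvMaxDiv, if_neg h]
        rw [e1, e2, ih (t - 1)]
        have e3 : t - 1 - (f : Int) = t - ((f : Nat) + 1 : Nat) := by push_cast; ring
        rw [e3]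

theorem pv_getneg_append (l : List Int) (a b : Int) :
    (PySem.List.pyGet? (l ++ [a, b]) (-1)).getD 0 = b ∧
    (PySem.List.pyGet? (l ++ [a, b]) (-2)).getD 0 = a := by
  constructor
  · rw [PySem.List.pyGet?_neg_one]
    simp
  · rw [PySem.List.pyGet?_neg_ofNat _ 2 (by omega) (by simp)]
    simp

-- A's loop, when no iteration can hit the perfect-square early return,
-- computes the same "greatest divisor" answer (with the factors-list fallback).
theorem pvALoop_eq_maxDiv (x : Int) (f : Nat) :
    ∀ (i : Int) (factors : List Int),
      (∀ j : Int, i ≤ j → j < i + f → PySem.Int.mod x j = 0 → j ≠ PySem.Int.floordiv x j) →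
      pvALoop x factors f i =
        match pvMaxDiv x (i + f - 1) f with
        | some m => (PySem.Int.floordiv x m, m)
        | none =>
            if factors.length < 2 then (2, 2)
            else ((PySem.List.pyGet? factors (-1)).getD 0, (PySem.List.pyGet? factors (-2)).getD 0) := by
  induction f with
  | zero => intro i factors _; simp [pvALoop, pvMaxDiv]
  | succ f ih =>
      intro i factors H
      have htop : i + ((f : Nat) + 1 : Nat) - 1 = i + (f : Int) := by push_cast; ring
      have hmid : i + 1 + (f : Int) - 1 = i + (f : Int) := by ring
      have hbot : i + (f : Int) - (f : Int) = i := by ring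
      have H' : ∀ j : Int, i + 1 ≤ j → j < i + 1 + (f : Nat) →
          PySem.Int.mod x j = 0 → j ≠ PySem.Int.floordiv x j := by
        intro j hj1 hj2 hj3; exact H j (by omega) (by push_cast at hj2 ⊢; omega) hj3
      rw [pvALoop, htop, pvMaxDiv_peel]
      by_cases h1 : PySem.Int.mod x i = 0
      · have hne := H i le_rfl (by push_cast; omega) h1
        rw [if_pos h1, if_neg hne, ih (i + 1) (factors ++ [i, PySem.Int.floordiv x i]) H', hmid]
        cases pvMaxDiv x (i + (f : Int)) f with
        | some m => rfl
        | none =>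
            have hlen : ¬ (factors ++ [i, PySem.Int.floordiv x i]).length < 2 := by simp
            rcases pv_getneg_append factors i (PySem.Int.floordiv x i) with ⟨e1, e2⟩
            rw [if_neg hlen, e1, e2, hbot, if_pos h1]
      · rw [if_neg h1, ih (i + 1) factors H', hmid]
        cases pvMaxDiv x (i + (f : Int)) f with
        | some m => rfl
        | none => simp [hbot, h1]

-- perfect-square case: A's loop runs up to i = n = sqrt x and returns (n, n) there
theorem pvALoop_square (n : Int) (hn : 2 ≤ n) (x : Int) (hx : x = n * n) :
    ∀ (k : Nat) (i : Int) (factors : List Int), i + k = n → 2 ≤ i →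
      pvALoop x factors (k + 1) i = (n, n) := by
  intro k
  induction k with
  | zero =>
      intro i factors hi h2
      have hin : i = n := by omega
      subst hin hx
      have hmod : PySem.Int.mod (i * i) i = 0 :=
        (PySem.Int.mod_eq_zero_iff_dvd _ _).2 ⟨i, rfl⟩
      have hdiv : PySem.Int.floordiv (i * i) i = i := by
        rw [PySem.Int.floordiv_eq_ediv_of_pos (by omega)]
        exact Int.mul_ediv_cancel_left _ (by omega)
      simp [pvALoop, hmod, hdiv]
  | succ k ih =>
      intro i factors hi h2
      have hlt : i < n := by omega
      have hii : i * i < n * n := by nlinarith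
      rw [pvALoop]
      split_ifs with h1 hsq
      · -- i = x // i with x % i = 0 would force x = i * i < n * n = x
        exfalso
        rcases (PySem.Int.mod_eq_zero_iff_dvd x i).1 h1 with ⟨c, hc⟩
        have hdiv : PySem.Int.floordiv x i = c := by
          rw [PySem.Int.floordiv_eq_ediv_of_pos (by omega), hc]
          exact Int.mul_ediv_cancel_left _ (by omega)
        rw [hdiv] at hsq
        subst hsq
        omega
      · exact ih (i + 1) _ (by omega) (by omega)
      · exact ih (i + 1) _ (by omega) (by omega)

-- x = j*j with 0 ≤ j forces Nat.sqrt x.toNat = j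
theorem pv_sqrt_of_square (j : Int) (hj : 0 ≤ j) : Nat.sqrt ((j * j).toNat) = j.toNat := by
  have : (j * j).toNat = j.toNat * j.toNat := by
    rw [Int.toNat_mul hj hj]
  rw [this, ← pow_two, Nat.sqrt_eq']

-- ===== VERDICT (by name: the statement is the Claim_ definition above) =====
theorem divied_big_two_factor_spec : Claim_equal_divied_big_two_factor := by
  intro x _ hpre
  unfold Spec_divied_big_two_factor
  simp only [divied_big_two_factor, divied_big_two_factor_alt]
  set n : Int := Int.ofNat (Nat.sqrt x.toNat) with hn
  have hn0 : 0 ≤ n := by rw [hn]; exact Int.natCast_nonneg _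
  by_cases h2 : n < 2
  · -- empty ranges on both sides
    have ha : (n + 1 - 2).toNat = 0 := by omega
    have hb : (n - 1).toNat = 0 := by omega
    simp [ha, hb, pvALoop, pvBLoop]
  · rw [not_lt] at h2
    by_cases hsq : x = n * n
    · -- perfect square: both return (n, n)
      have hfa : (n + 1 - 2).toNat = (n - 2).toNat + 1 := by omega
      have hA : pvALoop x [] (n + 1 - 2).toNat 2 = (n, n) := by
        rw [hfa]
        exact pvALoop_square n h2 x hsq (n - 2).toNat 2 [] (by omega) le_rfl
      have hfb : (n - 1).toNat = (n - 2).toNat + 1 := by omega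
      have hmod : PySem.Int.mod x n = 0 :=
        (PySem.Int.mod_eq_zero_iff_dvd _ _).2 ⟨n, hsq⟩
      have hdiv : PySem.Int.floordiv x n = n := by
        rw [PySem.Int.floordiv_eq_ediv_of_pos (by omega), hsq]
        exact Int.mul_ediv_cancel_left _ (by omega)
      rw [hA, hfb, pvBLoop, if_pos hmod, hdiv]
    · -- no iteration of A can take the square branch
      have H : ∀ j : Int, 2 ≤ j → j < 2 + ((n + 1 - 2).toNat : Int) →
          PySem.Int.mod x j = 0 → j ≠ PySem.Int.floordiv x j := by
        intro j hj1 hj2 hmod heq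
        rcases (PySem.Int.mod_eq_zero_iff_dvd x j).1 hmod with ⟨c, hc⟩
        have hdiv : PySem.Int.floordiv x j = c := by
          rw [PySem.Int.floordiv_eq_ediv_of_pos (by omega), hc]
          exact Int.mul_ediv_cancel_left _ (by omega)
        rw [hdiv] at heq
        subst heq
        -- x = j * j, so n = sqrt x = j and x = n * n, contradiction
        apply hsq
        have : Nat.sqrt ((j * j).toNat) = j.toNat := pv_sqrt_of_square j (by omega)
        rw [hc, hn, hc, this]
        have : ((j.toNat : Int)) = j := Int.toNat_of_nonneg (by omega)
        rw [Int.ofNat_eq_natCast, this]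
      rw [pvALoop_eq_maxDiv x _ 2 [] H, pvBLoop_eq_maxDiv]
      have hf : ((n + 1 - 2).toNat : Int) = n - 1 := by omega
      have hf2 : (n + 1 - 2).toNat = (n - 1).toNat := by omega
      have htop : (2 : Int) + ((n + 1 - 2).toNat : Int) - 1 = n := by omega
      rw [htop, hf2]
      cases pvMaxDiv x n (n - 1).toNat with
      | some m => rfl
      | none => simp
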